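-- pv_equiv track=rewrite | github.com/codebyshennan/dsai | docs/scripts/add_after_outcomes.py | clean_outcome_text
-- ===== SOURCE A (Python) =====
-- def clean_outcome_text(text: str) -> str:
--     t = text.strip()
--     for prefix in (
--         "After this submodule you can ",
--         "After this submodule ",
--         "After this module you can ",
--         "After this module ",
--     ):
--         if t.startswith(prefix):
--             t = t[len(prefix) :].strip()
--             if t and t[0].islower():
--                 t = t[0].upper() + t[1:]
--             break
--     return t
-- ===== SOURCE B (Python) =====
-- def clean_outcome_text(text: str) -> str:
--     t = text.strip()
--     if not t.startswith("After this "):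
--         return t
--     rest = t[len("After this "):]
--     if rest.startswith("submodule "):
--         rest = rest[len("submodule "):]
--     elif rest.startswith("module "):
--         rest = rest[len("module "):]
--     else:
--         return t
--     if rest.startswith("you can "):
--         rest = rest[len("you can "):]
--     rest = rest.strip()
--     if rest and rest[0].islower():
--         rest = rest[0].upper() + rest[1:]
--     return rest
-- ===== Notes on version B (the rewrite author's own statement) =====
-- stated objective: simpler
-- what changed: Replaces the four longest-first full-prefix startswith scans with a single stepwise parse that consumes the shared lead-in, then the module word, then the optional tail phrase, so each piece of the prefix is matched once.
import Mathlib
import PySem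

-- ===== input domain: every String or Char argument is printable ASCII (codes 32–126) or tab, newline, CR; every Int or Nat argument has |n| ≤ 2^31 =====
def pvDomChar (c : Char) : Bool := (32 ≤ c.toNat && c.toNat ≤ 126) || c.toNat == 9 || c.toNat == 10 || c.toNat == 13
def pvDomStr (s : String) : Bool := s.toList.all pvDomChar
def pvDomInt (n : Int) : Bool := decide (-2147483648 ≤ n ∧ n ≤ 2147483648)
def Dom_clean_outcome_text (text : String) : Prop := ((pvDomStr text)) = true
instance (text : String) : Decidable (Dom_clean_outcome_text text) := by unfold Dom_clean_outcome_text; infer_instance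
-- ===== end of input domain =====

-- B replaces A's four longest-first full-prefix startswith scans by a stepwise parse
-- ('After this ', then 'submodule '/'module ', then optional 'you can '); simpler, same cost.

-- ===== PORT A =====
-- A's capitalization step: "if t and t[0].islower(): t = t[0].upper() + t[1:]"
def pvCapA (t : List Char) : List Char :=
  match t with
  | [] => t
  | c :: rest => if PySem.Chars.islower c then PySem.Chars.upperChar c :: rest else t

-- A's "for prefix in (...): if t.startswith(prefix): ...; break"
def pvLoopA (t : List Char) : List (List Char) → List Char
  | [] => t
  | p :: ps =>
      if PySem.Chars.startswith t p then
        pvCapA (PySem.Chars.strip (PySem.List.slice t (some (p.length : Int)) none))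
      else pvLoopA t ps

def clean_outcome_text (text : String) : String :=
  String.ofList (pvLoopA (PySem.Chars.strip text.toList)
    ["After this submodule you can ".toList,
     "After this submodule ".toList,
     "After this module you can ".toList,
     "After this module ".toList])

-- ===== PORT B =====
-- B's tail: optional "you can ", strip, capitalize first lowercase char
def pvFinishB (r : List Char) : List Char :=
  let r := if PySem.Chars.startswith r "you can ".toList
           then PySem.List.slice r (some (("you can ".toList.length : Nat) : Int)) none else r
  let r := PySem.Chars.strip r
  match r with
  | [] => r
  | c :: rest => if PySem.Chars.islower c then PySem.Chars.upperChar c :: rest else r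

def clean_outcome_text_alt (text : String) : String :=
  let t := PySem.Chars.strip text.toList
  String.ofList (
    if PySem.Chars.startswith t "After this ".toList then
      let rest := PySem.List.slice t (some (("After this ".toList.length : Nat) : Int)) none
      if PySem.Chars.startswith rest "submodule ".toList then
        pvFinishB (PySem.List.slice rest (some (("submodule ".toList.length : Nat) : Int)) none)
      else if PySem.Chars.startswith rest "module ".toList then
        pvFinishB (PySem.List.slice rest (some (("module ".toList.length : Nat) : Int)) none)
      else t
    else t)

-- ===== PRECONDITION & SPEC =====
def Spec_clean_outcome_text (text : String) (out : String) : Prop := out = clean_outcome_text_alt text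
instance (text : String) (out : String) : Decidable (Spec_clean_outcome_text text out) := by unfold Spec_clean_outcome_text; infer_instance

-- ===== CLAIM (what is proved, stated in full; the proofs are below) =====
def Claim_equal_clean_outcome_text : Prop := ∀ (text : String), Dom_clean_outcome_text text → Spec_clean_outcome_text text (clean_outcome_text text)

-- ===== LEMMAS AND PROOFS =====

-- startswith on a concatenated pattern = startswith on the first part and then the second on the rest
lemma pv_sw_append (t a b : List Char) :
    PySem.Chars.startswith t (a ++ b) =
      (PySem.Chars.startswith t a && PySem.Chars.startswith (t.drop a.length) b) := by
  rw [Bool.eq_iff_iff]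
  simp only [Bool.and_eq_true, PySem.Chars.startswith_iff]
  constructor
  · rintro ⟨u, rfl⟩
    refine ⟨⟨b ++ u, by simp⟩, ?_⟩
    rw [List.append_assoc, List.drop_left]
    exact ⟨u, rfl⟩
  · rintro ⟨⟨u, rfl⟩, h⟩
    rw [List.drop_left] at h
    rcases h with ⟨v, rfl⟩
    exact ⟨v, by simp⟩

-- slice xs[n:] at the literal offsets the ports use, as List.drop
lemma pv_d11 (xs : List Char) : PySem.List.slice xs (some 11) none = xs.drop 11 := by simp [pysem]
lemma pv_d10 (xs : List Char) : PySem.List.slice xs (some 10) none = xs.drop 10 := by simp [pysem]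
lemma pv_d8 (xs : List Char) : PySem.List.slice xs (some 8) none = xs.drop 8 := by simp [pysem]
lemma pv_d7 (xs : List Char) : PySem.List.slice xs (some 7) none = xs.drop 7 := by simp [pysem]
lemma pv_d29 (xs : List Char) : PySem.List.slice xs (some 29) none = xs.drop 29 := by simp [pysem]
lemma pv_d26 (xs : List Char) : PySem.List.slice xs (some 26) none = xs.drop 26 := by simp [pysem]
lemma pv_d21 (xs : List Char) : PySem.List.slice xs (some 21) none = xs.drop 21 := by simp [pysem]
lemma pv_d18 (xs : List Char) : PySem.List.slice xs (some 18) none = xs.drop 18 := by simp [pysem]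

-- B's tail, with its capitalization step recognised as the same step A performs
lemma pv_finishB_eq (r : List Char) :
    pvFinishB r = pvCapA (PySem.Chars.strip
      (if PySem.Chars.startswith r "you can ".toList then PySem.List.slice r (some 8) none else r)) := rfl

set_option maxHeartbeats 800000 in
lemma pv_main (t : List Char) :
    pvLoopA t
      ["After this submodule you can ".toList,
       "After this submodule ".toList,
       "After this module you can ".toList,
       "After this module ".toList] =
    (if PySem.Chars.startswith t "After this ".toList then
      let rest := PySem.List.slice t (some (("After this ".toList.length : Nat) : Int)) none
      if PySem.Chars.startswith rest "submodule ".toList then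
        pvFinishB (PySem.List.slice rest (some (("submodule ".toList.length : Nat) : Int)) none)
      else if PySem.Chars.startswith rest "module ".toList then
        pvFinishB (PySem.List.slice rest (some (("module ".toList.length : Nat) : Int)) none)
      else t
    else t) := by
  have e1 : "After this submodule you can ".toList =
      "After this ".toList ++ ("submodule ".toList ++ "you can ".toList) := by decide
  have e2 : "After this submodule ".toList = "After this ".toList ++ "submodule ".toList := by decide
  have e3 : "After this module you can ".toList =
      "After this ".toList ++ ("module ".toList ++ "you can ".toList) := by decide
  have e4 : "After this module ".toList = "After this ".toList ++ "module ".toList := by decide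
  have L1 : ("After this ".toList ++ ("submodule ".toList ++ "you can ".toList)).length = 29 := by decide
  have L2 : ("After this ".toList ++ "submodule ".toList).length = 21 := by decide
  have L3 : ("After this ".toList ++ ("module ".toList ++ "you can ".toList)).length = 26 := by decide
  have L4 : ("After this ".toList ++ "module ".toList).length = 18 := by decide
  have lH : "After this ".toList.length = 11 := by decide
  have lS : "submodule ".toList.length = 10 := by decide
  have lM : "module ".toList.length = 7 := by decide
  simp only [pvLoopA, pv_finishB_eq, e1, e2, e3, e4, pv_sw_append, L1, L2, L3, L4, lH, lS, lM,
    Nat.cast_ofNat, pv_d11, pv_d10, pv_d8, pv_d7, pv_d29, pv_d26, pv_d21, pv_d18,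
    List.drop_drop, Nat.reduceAdd]
  cases h1 : PySem.Chars.startswith t "After this ".toList
  · simp only [Bool.false_eq_true, if_false, Bool.false_and]
  · cases h2 : PySem.Chars.startswith (t.drop 11) "submodule ".toList
    · cases h3 : PySem.Chars.startswith (t.drop 11) "module ".toList
      · simp only [Bool.false_eq_true, if_false, Bool.false_and, Bool.and_false, if_true]
      · cases h5 : PySem.Chars.startswith (t.drop 18) "you can ".toList <;> simp only [Bool.false_eq_true, if_false, Bool.false_and, Bool.and_false, Bool.and_true, if_true]
    · cases h4 : PySem.Chars.startswith (t.drop 21) "you can ".toList <;> simp only [Bool.false_eq_true, if_false, Bool.true_and, Bool.and_false, Bool.and_true, if_true]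

-- ===== VERDICT (by name: the statement is the Claim_ definition above) =====
theorem clean_outcome_text_spec : Claim_equal_clean_outcome_text := by
  intro text _
  unfold Spec_clean_outcome_text clean_outcome_text clean_outcome_text_alt
  rw [pv_main]
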